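-- pv_equiv track=rewrite | github.com/ewhacote/ewhaCote_minju | 0823_양궁대회.py | solution
-- ===== SOURCE A (Python) =====
-- from itertools import combinations_with_replacement
--
-- def solution(n, info):
--     answer = [0] * 11
--     max_diff = 0
--
--     for res in combinations_with_replacement(range(11), n):
--         now = [0] * 11
--         for r in res:
--             now[10 - r] += 1
--
--         lion, peach = 0, 0
--         for i, (l, p) in enumerate(zip(now, info)):
--             if l > p:
--                 lion += (10 - i)
--             elif p > 0:
--                 peach += (10 - i)
--
--         if lion > peach and (lion - peach) > max_diff:
--             max_diff = lion - peach
--             answer = now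
--
--     return answer if max_diff > 0 else [-1]
-- ===== SOURCE B (Python) =====
-- def solution(n, info):
--     m = len(info)
--
--     def contrib(s, c):
--         # score change at score s if the lion shoots c arrows there
--         i = 10 - s
--         if i >= m:
--             return 0
--         if c > info[i]:
--             return s
--         if info[i] > 0:
--             return -s
--         return 0
--
--     def go(left, rem, acc_diff, acc, best):
--         # left = number of scores still to decide (scores 10-left+1 .. 10 remain);
--         # acc = counts already fixed for scores 0 .. 10-left-1... ; best = (best_diff, best_now)
--         if left == 0:
--             d = acc_diff + contrib(10, rem)
--             if d > best[0]:
--                 return (d, (acc + [rem])[::-1])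
--             return best
--         for c in range(rem, -1, -1):
--             best = go(left - 1, rem - c, acc_diff + contrib(10 - left, c), acc + [c], best)
--         return best
--
--     best_diff, best_now = go(10, n, 0, [], (0, None))
--     return best_now if best_diff > 0 else [-1]
-- ===== Notes on version B (the rewrite author's own statement) =====
-- stated objective: alternative
-- what changed: B replaces itertools.combinations_with_replacement over sorted score-tuples (plus a per-tuple histogram pass and a per-tuple enumerate/zip rescoring pass) by a direct recursion over the 11 targets that distributes the remaining arrows, building the count vector and the score difference incrementally, so each enumeration node does O(1) work instead of O(n+11) per tuple.
import Mathlib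
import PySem

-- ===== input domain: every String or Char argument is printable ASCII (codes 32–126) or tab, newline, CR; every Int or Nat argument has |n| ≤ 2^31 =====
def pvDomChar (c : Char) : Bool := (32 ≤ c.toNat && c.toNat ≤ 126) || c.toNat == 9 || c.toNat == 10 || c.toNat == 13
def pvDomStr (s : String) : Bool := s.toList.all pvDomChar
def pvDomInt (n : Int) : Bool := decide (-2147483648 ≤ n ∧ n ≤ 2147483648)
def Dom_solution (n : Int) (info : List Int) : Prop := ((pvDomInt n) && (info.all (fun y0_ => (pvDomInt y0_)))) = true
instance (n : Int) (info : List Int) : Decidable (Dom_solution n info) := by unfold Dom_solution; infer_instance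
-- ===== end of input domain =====

-- B replaces the itertools multiset enumeration + per-tuple histogram + per-tuple rescoring by a
-- direct recursion over the 11 targets that distributes the arrows and scores incrementally (objective: alternative).

-- ===== PORT A =====
-- itertools.combinations_with_replacement(pool, r), tuples in the order itertools yields them
def pvCwr (pool : List Int) (r : Nat) : List (List Int) :=
  match r, pool with
  | 0, _ => [[]]
  | _ + 1, [] => []
  | r + 1, x :: rest => (pvCwr (x :: rest) r).map (fun t => x :: t) ++ pvCwr rest (r + 1)
termination_by (r, pool.length)

def solution (n : Int) (info : List Int) : List Int :=
  -- answer = [0]*11; max_diff = 0; for res in cwr(range(11), n): …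
  let fin :=
    (pvCwr (PySem.List.pyRange 0 11 1) n.toNat).foldl
      (fun (st : List Int × Int) (res : List Int) =>
        -- now = [0]*11; for r in res: now[10-r] += 1
        let now := res.foldl
          (fun nw r => PySem.List.pySetD nw (10 - r) (PySem.List.pyGetD nw (10 - r) 0 + 1))
          (List.replicate 11 0)
        -- lion, peach = 0, 0; for i, (l, p) in enumerate(zip(now, info)): …
        let lp :=
          (now.zip info).foldl
            (fun (a : Int × Int × Int) (x : Int × Int) =>
              let i := a.1
              if x.1 > x.2 then (i + 1, a.2.1 + (10 - i), a.2.2)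
              else if x.2 > 0 then (i + 1, a.2.1, a.2.2 + (10 - i))
              else (i + 1, a.2.1, a.2.2))
            (0, 0, 0)
        let lion := lp.2.1
        let peach := lp.2.2
        if lion > peach ∧ lion - peach > st.2 then (now, lion - peach) else st)
      (List.replicate 11 0, 0)
  if fin.2 > 0 then fin.1 else [-1]

-- ===== PORT B =====
def pvContrib (info : List Int) (m : Int) (s : Int) (c : Int) : Int :=
  let i : Int := 10 - s
  if i ≥ m then 0
  else if c > PySem.List.pyGetD info i 0 then s
  else if PySem.List.pyGetD info i 0 > 0 then -s
  else 0

def pvGo (info : List Int) (m : Int) (left : Nat) (rem : Int) (accDiff : Int)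
    (acc : List Int) (best : Int × Option (List Int)) : Int × Option (List Int) :=
  match left with
  | 0 =>
    let d := accDiff + pvContrib info m 10 rem
    if d > best.1 then (d, some ((acc ++ [rem]).reverse)) else best
  | left + 1 =>
    (PySem.List.pyRange rem (-1) (-1)).foldl
      (fun b c => pvGo info m left (rem - c) (accDiff + pvContrib info m (10 - (left + 1 : Nat)) c) (acc ++ [c]) b)
      best

def solution_alt (n : Int) (info : List Int) : List Int :=
  let m : Int := info.length
  let r := pvGo info m 10 n 0 [] (0, none)
  if r.1 > 0 then r.2.getD [-1] else [-1]

-- ===== PRECONDITION & SPEC =====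
-- Pre_ excludes n < 0, on which Python's combinations_with_replacement raises ValueError.
def Pre_solution (n : Int) (info : List Int) : Prop := 0 ≤ n
instance (n : Int) (info : List Int) : Decidable (Pre_solution n info) := by unfold Pre_solution; infer_instance
def pvWitness_solution : Int × List Int := (2, [1, 0, 0, 0, 0, 0, 0, 0, 0, 0, 0])

def Spec_solution (n : Int) (info : List Int) (out : List Int) : Prop := out = solution_alt n info
instance (n : Int) (info : List Int) (out : List Int) : Decidable (Spec_solution n info out) := by unfold Spec_solution; infer_instance

-- ===== CLAIM (what is proved, stated in full; the proofs are below) =====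
def Claim_equal_solution : Prop := ∀ (n : Int) (info : List Int), Dom_solution n info → Pre_solution n info → Spec_solution n info (solution n info)

-- ===== LEMMAS AND PROOFS =====

-- proof-side abbreviations ------------------------------------------------

-- [r, r-1, ..., 0]
def pvDescN : Nat → List Nat
  | 0 => [0]
  | r + 1 => (r + 1) :: pvDescN r

-- counts of the scores 10-left .. 10 in res, in ascending score order
def pvCnts (left : Nat) (res : List Int) : List Int :=
  match left with
  | 0 => [(res.count 10 : Int)]
  | left + 1 => (res.count ((10 : Int) - (left + 1 : Nat)) : Int) :: pvCnts left res

-- total contribution of the scores 10-left .. 10 of res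
def pvTd (info : List Int) (m : Int) (left : Nat) (res : List Int) : Int :=
  match left with
  | 0 => pvContrib info m 10 (res.count 10)
  | left + 1 => pvContrib info m ((10 : Int) - (left + 1 : Nat)) (res.count ((10 : Int) - (left + 1 : Nat))) + pvTd info m left res

def pvLeaf (b : Int × Option (List Int)) (now : List Int) (d : Int) : Int × Option (List Int) :=
  if d > b.1 then (d, some now) else b

-- A's loop body, named
def pvStepA (info : List Int) (st : List Int × Int) (res : List Int) : List Int × Int :=
  let now := res.foldl
    (fun nw r => PySem.List.pySetD nw (10 - r) (PySem.List.pyGetD nw (10 - r) 0 + 1))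
    (List.replicate 11 0)
  let lp :=
    (now.zip info).foldl
      (fun (a : Int × Int × Int) (x : Int × Int) =>
        let i := a.1
        if x.1 > x.2 then (i + 1, a.2.1 + (10 - i), a.2.2)
        else if x.2 > 0 then (i + 1, a.2.1, a.2.2 + (10 - i))
        else (i + 1, a.2.1, a.2.2))
      (0, 0, 0)
  let lion := lp.2.1
  let peach := lp.2.2
  if lion > peach ∧ lion - peach > st.2 then (now, lion - peach) else st

-- per-position difference of the scoring loop, structurally on both lists
def pvE : List Int → List Int → Int → Int
  | [], _, _ => 0
  | _ :: _, [], _ => 0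
  | a :: nw, b :: inf, i => (if a > b then 10 - i else if b > 0 then -(10 - i) else 0) + pvE nw inf (i + 1)

-- the same, indexing info globally like pvContrib does
def pvF (info : List Int) : List Int → Nat → Int
  | [], _ => 0
  | a :: t, k => pvContrib info (info.length) (10 - (k : Int)) a + pvF info t (k + 1)

-- small facts ---------------------------------------------------------------

theorem pvDescN_le {c r : Nat} (h : c ∈ pvDescN r) : c ≤ r := by
  induction r with
  | zero => simp [pvDescN] at h; omega
  | succ r ih => rcases (by simpa [pvDescN] using h) with h | h
                 · omega
                 · exact Nat.le_succ_of_le (ih h)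

theorem pvCountdown (r : Nat) :
    PySem.List.pyRange (r : Int) (-1) (-1) = (pvDescN r).map (fun c : Nat => (c : Int)) := by
  induction r with
  | zero =>
    rw [PySem.List.pyRange_neg_one_cons (by norm_num)]
    rw [show ((0 : Nat) : Int) - 1 = -1 by norm_num, PySem.List.pyRange_neg_one_eq_nil (by norm_num)]
    simp [pvDescN]
  | succ r ih =>
    rw [PySem.List.pyRange_neg_one_cons (by push_cast; omega)]
    rw [show ((r + 1 : Nat) : Int) - 1 = (r : Int) by push_cast; ring, ih]
    simp [pvDescN]


theorem pvCwr_singleton (x : Int) (r : Nat) : pvCwr [x] r = [List.replicate r x] := by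
  induction r with
  | zero => simp [pvCwr]
  | succ r ih => simp [pvCwr, ih, List.replicate_succ]


theorem pvCwr_mem (pool : List Int) (r : Nat) :
    ∀ res ∈ pvCwr pool r, ∀ x ∈ res, x ∈ pool := by
  fun_induction pvCwr pool r with
  | case1 pool => intro res hres x hx; simp at hres; subst hres; simp at hx
  | case2 r => intro res hres; simp at hres
  | case3 r x rest ih1 ih2 =>
    intro res hres y hy
    simp only [List.mem_append] at hres
    rcases hres with hres | hres
    · obtain ⟨t, ht, rfl⟩ := List.mem_map.1 hres
      rcases List.mem_cons.1 hy with rfl | hy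
      · exact List.mem_cons_self ..
      · exact ih1 t ht y hy
    · exact List.mem_cons_of_mem _ (ih2 res hres y hy)

theorem pvDescN_shift {β : Type} (r : Nat) (g : Nat → List β) :
    ((pvDescN r).flatMap fun c => g (c + 1)) ++ g 0 = g (r + 1) ++ (pvDescN r).flatMap g := by
  induction r with
  | zero => simp [pvDescN]
  | succ r ih => simp [pvDescN, List.flatMap_cons, List.append_assoc, ih]


theorem pvCwr_group (x : Int) (rest : List Int) (r : Nat) :
    pvCwr (x :: rest) r
      = (pvDescN r).flatMap fun c => (pvCwr rest (r - c)).map fun t => List.replicate c x ++ t := by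
  induction r with
  | zero => simp [pvCwr, pvDescN]
  | succ r ih =>
    rw [pvCwr, ih, List.map_flatMap]
    have hg : ∀ c : Nat,
        ((pvCwr rest (r - c)).map fun t => List.replicate c x ++ t).map (fun t => x :: t)
          = (pvCwr rest (r + 1 - (c + 1))).map fun t => List.replicate (c + 1) x ++ t := by
      intro c
      simp [List.map_map, List.replicate_succ, Function.comp]
    have h0 : pvCwr rest (r + 1) = (pvCwr rest (r + 1 - 0)).map fun t => List.replicate 0 x ++ t := by
      simp
    rw [h0]
    simp only [hg]
    rw [pvDescN_shift r (fun c => (pvCwr rest (r + 1 - c)).map fun t => List.replicate c x ++ t)]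
    simp [pvDescN]

theorem pvCnts_prepend_lt (left : Nat) (q : Int) (c : Nat) (t : List Int)
    (h : q < 10 - (left : Int)) :
    pvCnts left (List.replicate c q ++ t) = pvCnts left t := by
  induction left with
  | zero =>
    have hq : ¬ ((q : Int) = 10) := by omega
    simp [pvCnts, List.count_append, List.count_replicate, hq]
  | succ left ih =>
    have h1 : q < 10 - (left : Int) := by push_cast at h ⊢; omega
    have hq : ¬ (q = (10 : Int) - ((left : Int) + 1)) := by push_cast at h ⊢; omega
    simp [pvCnts, List.count_append, List.count_replicate, hq, ih h1]


theorem pvTd_prepend_lt (info : List Int) (m : Int) (left : Nat) (q : Int) (c : Nat) (t : List Int)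
    (h : q < 10 - (left : Int)) :
    pvTd info m left (List.replicate c q ++ t) = pvTd info m left t := by
  induction left with
  | zero =>
    have hq : ¬ ((q : Int) = 10) := by omega
    simp [pvTd, List.count_append, List.count_replicate, hq]
  | succ left ih =>
    have h1 : q < 10 - (left : Int) := by push_cast at h ⊢; omega
    have hq : ¬ (q = (10 : Int) - ((left : Int) + 1)) := by push_cast at h ⊢; omega
    simp [pvTd, List.count_append, List.count_replicate, hq, ih h1]


-- the master correspondence: pvGo is A's fold over the cwr block of the remaining scores
theorem pvMaster (info : List Int) (m : Int) :
    ∀ (left : Nat), left ≤ 10 → ∀ (rem : Int), 0 ≤ rem →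
    ∀ (accd : Int) (acc : List Int) (best : Int × Option (List Int)),
    pvGo info m left rem accd acc best
      = (pvCwr (PySem.List.pyRange (10 - (left : Int)) 11 1) rem.toNat).foldl
          (fun b res => pvLeaf b ((acc ++ pvCnts left res).reverse) (accd + pvTd info m left res)) best := by
  intro left
  induction left with
  | zero =>
    intro _ rem hrem accd acc best
    rw [show (10 : Int) - ((0 : Nat) : Int) = 10 by norm_num,
        show (11 : Int) = 10 + 1 by norm_num,
        PySem.List.pyRange_one_singleton, pvCwr_singleton]
    have hc : (List.replicate rem.toNat (10 : Int)).count 10 = rem.toNat :=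
      List.count_replicate_self
    simp only [pvGo, List.foldl_cons, List.foldl_nil, pvLeaf, pvCnts, pvTd, hc,
      Int.toNat_of_nonneg hrem]
  | succ left ih =>
    intro hle rem hrem accd acc best
    have hlt : (10 : Int) - ((left + 1 : Nat) : Int) < 11 := by push_cast; omega
    have hsucc : (10 : Int) - ((left + 1 : Nat) : Int) + 1 = 10 - (left : Int) := by
      push_cast; ring
    -- LHS: unfold pvGo and turn the countdown range into pvDescN
    rw [show pvGo info m (left + 1) rem accd acc best
          = (PySem.List.pyRange rem (-1) (-1)).foldl
              (fun b c => pvGo info m left (rem - c)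
                (accd + pvContrib info m (10 - (left + 1 : Nat)) c) (acc ++ [c]) b) best
        from rfl]
    rw [show rem = ((rem.toNat : Nat) : Int) from (Int.toNat_of_nonneg hrem).symm]
    rw [pvCountdown rem.toNat, List.foldl_map]
    -- RHS: split off the head of the range and group the cwr list by the leading count
    rw [PySem.List.pyRange_one_cons hlt, hsucc, pvCwr_group, List.foldl_flatMap]
    rw [show (((rem.toNat : Nat) : Int)).toNat = rem.toNat by omega]
    apply PySem.List.foldl_congr_mem
    intro b c hc
    have hcle : c ≤ rem.toNat := pvDescN_le hc
    have hnn : (0 : Int) ≤ ((rem.toNat : Nat) : Int) - ((c : Nat) : Int) := by push_cast; omega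
    rw [ih (by omega) _ hnn]
    rw [show ((((rem.toNat : Nat) : Int) - ((c : Nat) : Int))).toNat = rem.toNat - c by omega]
    rw [List.foldl_map]
    apply PySem.List.foldl_congr_mem
    intro b' t ht
    have htmem : ∀ x ∈ t, 10 - (left : Int) ≤ x := by
      intro x hx
      exact (PySem.List.mem_pyRange_one.1 (pvCwr_mem _ _ t ht x hx)).1
    have hqlt : (10 : Int) - ((left + 1 : Nat) : Int) < 10 - (left : Int) := by push_cast; omega
    have hnotmem : ((10 : Int) - ((left + 1 : Nat) : Int)) ∉ t := by
      intro hmem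
      exact absurd (htmem _ hmem) (by push_cast at hqlt ⊢; omega)
    have hcount0 : t.count ((10 : Int) - ((left + 1 : Nat) : Int)) = 0 :=
      List.count_eq_zero.2 hnotmem
    have hcount0' : List.count ((10 : Int) - ((left : Int) + 1)) t = 0 := by
      push_cast at hcount0; exact hcount0
    have hprepc : pvCnts left (List.replicate c ((10 : Int) - ((left : Int) + 1)) ++ t) = pvCnts left t :=
      pvCnts_prepend_lt left _ c t (by push_cast; omega)
    have hprept : pvTd info m left (List.replicate c ((10 : Int) - ((left : Int) + 1)) ++ t) = pvTd info m left t :=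
      pvTd_prepend_lt info m left _ c t (by push_cast; omega)
    have hcnts : pvCnts (left + 1) (List.replicate c ((10 : Int) - ((left + 1 : Nat) : Int)) ++ t)
        = ((c : Nat) : Int) :: pvCnts left t := by
      simp [pvCnts, List.count_append, List.count_replicate_self, hcount0', hprepc]
    have htd : pvTd info m (left + 1) (List.replicate c ((10 : Int) - ((left + 1 : Nat) : Int)) ++ t)
        = pvContrib info m ((10 : Int) - ((left + 1 : Nat) : Int)) ((c : Nat) : Int) + pvTd info m left t := by
      simp [pvTd, List.count_append, List.count_replicate_self, hcount0', hprept]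
    rw [hcnts, htd]
    simp only [List.append_assoc, List.singleton_append, add_assoc]


-- A-side: the histogram loop computes the reversed count vector
theorem pvHistAux : ∀ (res : List Int), (∀ x ∈ res, 0 ≤ x ∧ x < 11) →
    ∀ b0 b1 b2 b3 b4 b5 b6 b7 b8 b9 b10 : Int,
    res.foldl
      (fun nw r => PySem.List.pySetD nw (10 - r) (PySem.List.pyGetD nw (10 - r) 0 + 1))
      [b0, b1, b2, b3, b4, b5, b6, b7, b8, b9, b10]
      = [b0 + res.count 10, b1 + res.count 9, b2 + res.count 8, b3 + res.count 7,
         b4 + res.count 6, b5 + res.count 5, b6 + res.count 4, b7 + res.count 3,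
         b8 + res.count 2, b9 + res.count 1, b10 + res.count 0] := by
  intro res
  induction res with
  | nil => intro _ b0 b1 b2 b3 b4 b5 b6 b7 b8 b9 b10; simp
  | cons r res ih =>
    intro h b0 b1 b2 b3 b4 b5 b6 b7 b8 b9 b10
    have hres : ∀ x ∈ res, 0 ≤ x ∧ x < 11 := fun x hx => h x (List.mem_cons_of_mem _ hx)
    obtain ⟨hr0, hr1⟩ := h r (List.mem_cons_self ..)
    rw [List.foldl_cons]
    interval_cases r
    · exact (ih hres b0 b1 b2 b3 b4 b5 b6 b7 b8 b9 (b10 + 1)).trans (by simp [List.count_cons]; push_cast; omega)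
    · exact (ih hres b0 b1 b2 b3 b4 b5 b6 b7 b8 (b9 + 1) b10).trans (by simp [List.count_cons]; push_cast; omega)
    · exact (ih hres b0 b1 b2 b3 b4 b5 b6 b7 (b8 + 1) b9 b10).trans (by simp [List.count_cons]; push_cast; omega)
    · exact (ih hres b0 b1 b2 b3 b4 b5 b6 (b7 + 1) b8 b9 b10).trans (by simp [List.count_cons]; push_cast; omega)
    · exact (ih hres b0 b1 b2 b3 b4 b5 (b6 + 1) b7 b8 b9 b10).trans (by simp [List.count_cons]; push_cast; omega)
    · exact (ih hres b0 b1 b2 b3 b4 (b5 + 1) b6 b7 b8 b9 b10).trans (by simp [List.count_cons]; push_cast; omega)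
    · exact (ih hres b0 b1 b2 b3 (b4 + 1) b5 b6 b7 b8 b9 b10).trans (by simp [List.count_cons]; push_cast; omega)
    · exact (ih hres b0 b1 b2 (b3 + 1) b4 b5 b6 b7 b8 b9 b10).trans (by simp [List.count_cons]; push_cast; omega)
    · exact (ih hres b0 b1 (b2 + 1) b3 b4 b5 b6 b7 b8 b9 b10).trans (by simp [List.count_cons]; push_cast; omega)
    · exact (ih hres b0 (b1 + 1) b2 b3 b4 b5 b6 b7 b8 b9 b10).trans (by simp [List.count_cons]; push_cast; omega)
    · exact (ih hres (b0 + 1) b1 b2 b3 b4 b5 b6 b7 b8 b9 b10).trans (by simp [List.count_cons]; push_cast; omega)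

theorem pvHist (res : List Int) (h : ∀ x ∈ res, 0 ≤ x ∧ x < 11) :
    res.foldl
      (fun nw r => PySem.List.pySetD nw (10 - r) (PySem.List.pyGetD nw (10 - r) 0 + 1))
      (List.replicate 11 0)
      = (pvCnts 10 res).reverse := by
  have e0 : List.replicate 11 (0 : Int) = [0, 0, 0, 0, 0, 0, 0, 0, 0, 0, 0] := rfl
  rw [e0, pvHistAux res h 0 0 0 0 0 0 0 0 0 0 0]
  rw [show (pvCnts 10 res).reverse
        = [(res.count (10 : Int) : Int), (res.count (9 : Int) : Int), (res.count (8 : Int) : Int),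
           (res.count (7 : Int) : Int), (res.count (6 : Int) : Int), (res.count (5 : Int) : Int),
           (res.count (4 : Int) : Int), (res.count (3 : Int) : Int), (res.count (2 : Int) : Int),
           (res.count (1 : Int) : Int), (res.count (0 : Int) : Int)] from rfl]
  simp


-- A-side: the scoring loop difference
theorem pvZipDiff (nw : List Int) :
    ∀ (inf : List Int) (i lion peach : Int),
    (((nw.zip inf).foldl
      (fun (a : Int × Int × Int) (x : Int × Int) =>
        let i := a.1
        if x.1 > x.2 then (i + 1, a.2.1 + (10 - i), a.2.2)
        else if x.2 > 0 then (i + 1, a.2.1, a.2.2 + (10 - i))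
        else (i + 1, a.2.1, a.2.2))
      (i, lion, peach)).2.1
    - ((nw.zip inf).foldl
      (fun (a : Int × Int × Int) (x : Int × Int) =>
        let i := a.1
        if x.1 > x.2 then (i + 1, a.2.1 + (10 - i), a.2.2)
        else if x.2 > 0 then (i + 1, a.2.1, a.2.2 + (10 - i))
        else (i + 1, a.2.1, a.2.2))
      (i, lion, peach)).2.2)
    = lion - peach + pvE nw inf i := by
  induction nw with
  | nil => intro inf i lion peach; simp [pvE]
  | cons a nw ih =>
    intro inf i lion peach
    cases inf with
    | nil => simp [pvE]
    | cons b inf =>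
      simp only [List.zip_cons_cons, List.foldl_cons]
      by_cases h1 : a > b
      · rw [if_pos h1, ih]; simp only [pvE, if_pos h1]; ring
      · rw [if_neg h1]
        by_cases h2 : b > 0
        · rw [if_pos h2, ih]; simp only [pvE, if_neg h1, if_pos h2]; ring
        · rw [if_neg h2, ih]; simp only [pvE, if_neg h1, if_neg h2]; ring


theorem pvContrib_eq (info : List Int) (k : Nat) (a : Int) :
    pvContrib info (info.length : Int) (10 - (k : Int)) a
      = if h : k < info.length then
          (if a > info[k] then 10 - (k : Int) else if info[k] > 0 then -(10 - (k : Int)) else 0)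
        else 0 := by
  unfold pvContrib
  have h10 : (10 : Int) - (10 - (k : Int)) = (k : Int) := by ring
  by_cases hkm : k < info.length
  · rw [dif_pos hkm]
    have hlt : ¬ ((10 : Int) - (10 - (k : Int)) ≥ (info.length : Int)) := by
      rw [h10]; push_cast; omega
    rw [if_neg hlt, h10, PySem.List.pyGetD_natCast,
        List.getD_eq_getElem?_getD, List.getElem?_eq_getElem hkm, Option.getD_some]
  · rw [dif_neg hkm]
    have hge : ((10 : Int) - (10 - (k : Int)) ≥ (info.length : Int)) := by
      rw [h10]; push_cast; omega
    rw [if_pos hge]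

theorem pvE_eq_pvF (info : List Int) (nw : List Int) :
    ∀ (k : Nat), k + nw.length ≤ 11 → pvE nw (info.drop k) (k : Int) = pvF info nw k := by
  induction nw with
  | nil =>
    intro k hk
    cases h : info.drop k <;> simp [pvE, pvF]
  | cons a t ih =>
    intro k hk
    simp only [pvF, pvContrib_eq]
    by_cases hkm : k < info.length
    · rw [List.drop_eq_getElem_cons hkm]
      simp only [pvE]
      rw [dif_pos hkm]
      have hcast : (k : Int) + 1 = ((k + 1 : Nat) : Int) := by push_cast; ring
      rw [hcast, ih (k + 1) (by simp at hk ⊢; omega)]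
    · have hdrop : info.drop k = [] := List.drop_eq_nil_of_le (by omega)
      have hdrop1 : info.drop (k + 1) = [] := List.drop_eq_nil_of_le (by omega)
      rw [dif_neg hkm, hdrop]
      have h0 : pvE (a :: t) [] (k : Int) = 0 := by simp [pvE]
      rw [h0, ← ih (k + 1) (by simp at hk ⊢; omega), hdrop1]
      cases t <;> simp [pvE]


theorem pvF_eq_pvTd (info : List Int) (res : List Int) :
    pvF info ((pvCnts 10 res).reverse) 0 = pvTd info (info.length) 10 res := by
  simp only [pvCnts, pvF, pvTd, List.reverse_cons, List.reverse_nil, List.nil_append,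
    List.cons_append]
  norm_num
  ring


theorem pvCnts_len (left : Nat) (res : List Int) : (pvCnts left res).length = left + 1 := by
  induction left with
  | zero => simp [pvCnts]
  | succ left ih => simp [pvCnts, ih]

-- A's step on a valid tuple, in closed form
theorem pvStepA_eq (info : List Int) (res : List Int) (st : List Int × Int)
    (h : ∀ x ∈ res, 0 ≤ x ∧ x < 11) :
    pvStepA info st res
      = (if 0 < pvTd info (info.length) 10 res ∧ pvTd info (info.length) 10 res > st.2
          then ((pvCnts 10 res).reverse, pvTd info (info.length) 10 res) else st) := by
  have hlen : ((pvCnts 10 res).reverse).length = 11 := by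
    rw [List.length_reverse, pvCnts_len]
  have h1 := pvZipDiff ((pvCnts 10 res).reverse) info 0 0 0
  have h3 := pvE_eq_pvF info ((pvCnts 10 res).reverse) 0 (by omega)
  rw [List.drop_zero, Nat.cast_zero, pvF_eq_pvTd] at h3
  rw [h3] at h1
  dsimp only at h1
  simp only [pvStepA]
  rw [pvHist res h]
  by_cases hc : 0 < pvTd info (info.length : Int) 10 res ∧ pvTd info (info.length : Int) 10 res > st.2
  · rw [if_pos (show _ ∧ _ from ⟨by omega, by omega⟩), if_pos hc]
    rw [h1]
    norm_num
  · rw [if_neg (fun hAB => hc ⟨by omega, by omega⟩), if_neg hc]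


def pvRel (stA : List Int × Int) (stB : Int × Option (List Int)) : Prop :=
  stA.2 = stB.1 ∧ 0 ≤ stA.2 ∧ (0 < stA.2 → stB.2 = some stA.1)

theorem pvPairFold (info : List Int) :
    ∀ (l : List (List Int)), (∀ res ∈ l, ∀ x ∈ res, 0 ≤ x ∧ x < 11) →
    ∀ (stA : List Int × Int) (stB : Int × Option (List Int)), pvRel stA stB →
    pvRel (l.foldl (pvStepA info) stA)
      (l.foldl (fun b res => pvLeaf b ((pvCnts 10 res).reverse) (pvTd info (info.length) 10 res)) stB) := by
  intro l
  induction l with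
  | nil => intro _ stA stB hrel; simpa using hrel
  | cons res l ih =>
    intro hmem stA stB hrel
    simp only [List.foldl_cons]
    apply ih (fun t ht x hx => hmem t (List.mem_cons_of_mem _ ht) x hx)
    rw [pvStepA_eq info res stA (hmem res (List.mem_cons_self ..))]
    obtain ⟨e1, e2, e3⟩ := hrel
    unfold pvLeaf
    by_cases hgt : pvTd info (info.length : Int) 10 res > stA.2
    · rw [if_pos ⟨by omega, hgt⟩, if_pos (by omega)]
      exact ⟨rfl, by omega, fun _ => rfl⟩
    · rw [if_neg (fun hc => hgt hc.2), if_neg (by omega)]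
      exact ⟨e1, e2, e3⟩



-- ===== VERDICT (by name: the statement is the Claim_ definition above) =====
theorem solution_spec : Claim_equal_solution := by
  intro n info _ hpre
  unfold Spec_solution
  have hpre' : (0 : Int) ≤ n := hpre
  have hA : solution n info
      = (if ((pvCwr (PySem.List.pyRange 0 11 1) n.toNat).foldl (pvStepA info) (List.replicate 11 0, 0)).2 > 0
          then ((pvCwr (PySem.List.pyRange 0 11 1) n.toNat).foldl (pvStepA info) (List.replicate 11 0, 0)).1
          else [-1]) := rfl
  have hB : solution_alt n info
      = (if (pvGo info (info.length : Int) 10 n 0 [] (0, none)).1 > 0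
          then (pvGo info (info.length : Int) 10 n 0 [] (0, none)).2.getD [-1] else [-1]) := rfl
  rw [hA, hB, pvMaster info (info.length : Int) 10 (by omega) n hpre' 0 [] (0, none)]
  simp only [List.nil_append, zero_add, show (10 : Int) - ((10 : Nat) : Int) = 0 from by norm_num]
  have hmem : ∀ res ∈ pvCwr (PySem.List.pyRange 0 11 1) n.toNat, ∀ x ∈ res, 0 ≤ x ∧ x < 11 := by
    intro res hres x hx
    exact PySem.List.mem_pyRange_one.1 (pvCwr_mem _ _ res hres x hx)
  have hrel := pvPairFold info _ hmem (List.replicate 11 0, 0) (0, none)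
    ⟨rfl, le_refl 0, fun hcon => absurd hcon (lt_irrefl 0)⟩
  obtain ⟨e1, e2, e3⟩ := hrel
  by_cases hpos :
      0 < ((pvCwr (PySem.List.pyRange 0 11 1) n.toNat).foldl (pvStepA info) (List.replicate 11 0, 0)).2
  · rw [if_pos hpos, if_pos (by omega), e3 hpos, Option.getD_some]
  · rw [if_neg hpos, if_neg (by omega)]
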